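-- pv_equiv track=rewrite | github.com/iecse/EulerSphere_TechTatva2025 | Round1/Arunima/72/72_code.py | last_five_digits_before_trailing_zeros
-- ===== SOURCE A (Python) =====
-- def last_five_digits_before_trailing_zeros(n):
--     """
--     Compute g(n) = last five digits before trailing zeroes in n!
--     Using efficient modular arithmetic to handle large n.
--     """
--     modulus = 100000
--
--     # Count trailing zeros Z = exponent of 5 in n!
--     Z = 0
--     temp = n
--     while temp > 0:
--         temp //= 5
--         Z += temp
--
--     # Compute n! without factors of 5 modulo 100000
--     def F(k):
--         """k! without factors of 5 modulo 100000"""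
--         if k == 0:
--             return 1
--
--         # Product of numbers 1 to k not divisible by 5
--         res = 1
--         # Use pattern: product repeats every 100000 numbers
--         full_cycles = k // 100000
--         remainder = k % 100000
--
--         # Precomputed product for one cycle of 100000 numbers not divisible by 5
--         # This is a constant that can be computed once
--         cycle_product = 1
--         for i in range(1, 100001):
--             if i % 5 != 0:
--                 cycle_product = (cycle_product * i) % modulus
--
--         res = pow(cycle_product, full_cycles, modulus)
--
--         # Multiply by remainder
--         for i in range(1, remainder + 1):
--             if i % 5 != 0:
--                 res = (res * i) % modulus
--
--         # Recursive part for factors of 5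
--         return (res * F(k // 5)) % modulus
--
--     fact_without_5 = F(n)
--
--     # Multiply by 2^Z mod 100000 to account for extra factors of 2
--     pow2 = pow(2, Z, modulus)
--     result = (fact_without_5 * pow2) % modulus
--
--     return result
-- ===== SOURCE B (Python) =====
-- _M = 100000
--
-- def _build():
--     cp = 1
--     pref = [1]
--     for i in range(1, _M + 1):
--         if i % 5 != 0:
--             cp = cp * i % _M
--         pref.append(cp)
--     return cp, pref
--
-- _CYCLE, _PREF = _build()
--
-- def last_five_digits_before_trailing_zeros(n):
--     """
--     Compute g(n) = last five digits before trailing zeroes in n!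
--     Tables (_CYCLE, _PREF) are built once; each call is O(log n) lookups.
--     """
--     Z = 0
--     t = n
--     while t > 0:
--         t //= 5
--         Z += t
--     res = 1
--     k = n
--     while k > 0:
--         q, r = divmod(k, _M)
--         res = res * pow(_CYCLE, q, _M) % _M * _PREF[r] % _M
--         k //= 5
--     return res * pow(2, Z, _M) % _M
-- ===== Notes on version B (the rewrite author's own statement) =====
-- stated objective: faster
-- what changed: A recomputes the 100000-element cycle product inside every level of its recursive F and runs a remainder loop per level; B precomputes the cycle product and a prefix-product table once at module level and replaces F's recursion and inner loops with an iterative loop of table lookups over k, k//5, k//25, ...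
import Mathlib
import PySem

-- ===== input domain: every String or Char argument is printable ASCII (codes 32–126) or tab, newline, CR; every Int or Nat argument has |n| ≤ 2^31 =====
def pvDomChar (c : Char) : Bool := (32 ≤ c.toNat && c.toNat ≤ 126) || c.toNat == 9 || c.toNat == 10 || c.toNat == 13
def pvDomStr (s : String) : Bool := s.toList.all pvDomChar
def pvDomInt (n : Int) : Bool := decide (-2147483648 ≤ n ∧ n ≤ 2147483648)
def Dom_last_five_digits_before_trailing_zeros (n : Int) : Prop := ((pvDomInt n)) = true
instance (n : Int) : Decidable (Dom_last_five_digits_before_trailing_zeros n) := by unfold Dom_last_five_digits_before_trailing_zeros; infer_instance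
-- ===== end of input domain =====

-- B precomputes the cycle product and a prefix-product table once and replaces A's
-- recursive F (which rebuilds the cycle product and loops over the remainder at every
-- level) with an iterative loop of table lookups; return value proved identical for n ≥ 0.

-- ===== PORT A =====
-- while temp > 0: temp //= 5; Z += temp   (fuel = n.toNat + 1 is only a termination guard)
def pvAZLoop : Nat → Int → Int → Int
  | 0, _, z => z
  | f + 1, t, z =>
    if t > 0 then
      let t' := PySem.Int.floordiv t 5
      pvAZLoop f t' (z + t')
    else z

-- F(k): k! without factors of 5 mod 100000; fuel is a termination guard (depth ≤ log₅ k).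
-- pow(cycle, e, m): exponent here is ≥ 0 on all admitted inputs, so `.toNat` is exact.
def pvAF : Nat → Int → Int
  | 0, _ => 1
  | f + 1, k =>
    if k = 0 then 1
    else
      let fullCycles := PySem.Int.floordiv k 100000
      let remainder := PySem.Int.mod k 100000
      let cycleProduct := (PySem.List.pyRange 1 100001 1).foldl
        (fun c i => if PySem.Int.mod i 5 ≠ 0 then PySem.Int.mod (c * i) 100000 else c) 1
      let res := PySem.Int.powMod cycleProduct fullCycles.toNat 100000
      let res := (PySem.List.pyRange 1 (remainder + 1) 1).foldl
        (fun c i => if PySem.Int.mod i 5 ≠ 0 then PySem.Int.mod (c * i) 100000 else c) res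
      PySem.Int.mod (res * pvAF f (PySem.Int.floordiv k 5)) 100000

def last_five_digits_before_trailing_zeros (n : Int) : Int :=
  let Z := pvAZLoop (n.toNat + 1) n 0
  let factWithout5 := pvAF (n.toNat + 1) n
  let pow2 := PySem.Int.powMod 2 Z.toNat 100000
  PySem.Int.mod (factWithout5 * pow2) 100000

-- ===== PORT B =====
-- _build(): one pass; the Python list is appended to, ported as cons + final reverse (same list).
def pvBuild : Int × List Int :=
  (PySem.List.pyRange 1 100001 1).foldl
    (fun st i =>
      let cp := if PySem.Int.mod i 5 ≠ 0 then PySem.Int.mod (st.1 * i) 100000 else st.1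
      (cp, cp :: st.2))
    (1, [1])

def pvCycle : Int := pvBuild.1
def pvPref : List Int := pvBuild.2.reverse

-- while t > 0: t //= 5; Z += t   (same guard-fuel scheme as the A port)
def pvBZLoop : Nat → Int → Int → Int
  | 0, _, z => z
  | f + 1, t, z =>
    if t > 0 then
      let t' := PySem.Int.floordiv t 5
      pvBZLoop f t' (z + t')
    else z

-- while k > 0: q, r = divmod(k, M); res = res*pow(_CYCLE,q,M)%M*_PREF[r]%M; k //= 5
-- divmod by the nonzero literal 100000 is exactly (floordiv, mod); _PREF[r] is always
-- in range in the Python, so `.getD 0` is exact; pow exponent q ≥ 0 on admitted inputs.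
def pvBLoop : Nat → Int → Int → Int
  | 0, _, res => res
  | f + 1, k, res =>
    if k > 0 then
      let q := PySem.Int.floordiv k 100000
      let r := PySem.Int.mod k 100000
      let res' := PySem.Int.mod
        (PySem.Int.mod (res * PySem.Int.powMod pvCycle q.toNat 100000) 100000 *
          ((PySem.List.pyGet? pvPref r).getD 0)) 100000
      pvBLoop f (PySem.Int.floordiv k 5) res'
    else res

def last_five_digits_before_trailing_zeros_alt (n : Int) : Int :=
  let Z := pvBZLoop (n.toNat + 1) n 0
  let res := pvBLoop (n.toNat + 1) n 1
  PySem.Int.mod (res * PySem.Int.powMod 2 Z.toNat 100000) 100000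

-- ===== PRECONDITION & SPEC =====
-- Pre_ excludes n < 0, on which the Python A raises ValueError
-- (pow(cycle_product, n//100000, 100000) with a negative exponent and a non-invertible base).
def Pre_last_five_digits_before_trailing_zeros (n : Int) : Prop := 0 ≤ n
instance (n : Int) : Decidable (Pre_last_five_digits_before_trailing_zeros n) := by
  unfold Pre_last_five_digits_before_trailing_zeros; infer_instance

def pvWitness_last_five_digits_before_trailing_zeros : Int := 3

def Spec_last_five_digits_before_trailing_zeros (n : Int) (out : Int) : Prop :=
  out = last_five_digits_before_trailing_zeros_alt n
instance (n : Int) (out : Int) : Decidable (Spec_last_five_digits_before_trailing_zeros n out) := by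
  unfold Spec_last_five_digits_before_trailing_zeros; infer_instance

-- ===== CLAIM (what is proved, stated in full; the proofs are below) =====
def Claim_equal_last_five_digits_before_trailing_zeros : Prop :=
  ∀ (n : Int), Dom_last_five_digits_before_trailing_zeros n →
    Pre_last_five_digits_before_trailing_zeros n →
    Spec_last_five_digits_before_trailing_zeros n (last_five_digits_before_trailing_zeros n)

-- ===== LEMMAS AND PROOFS =====

-- The multiply step shared by both Pythons' product loops (exactly the ports' lambda).
def pvStep (c i : Int) : Int :=
  if PySem.Int.mod i 5 ≠ 0 then PySem.Int.mod (c * i) 100000 else c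

lemma pvStepLam :
    (fun c i => if PySem.Int.mod i 5 ≠ 0 then PySem.Int.mod (c * i) 100000 else c) = pvStep := rfl

-- product over 1..r of the numbers not divisible by 5, mod 100000
def pvP (r : Nat) : Int := (PySem.List.pyRange 1 ((r : Int) + 1) 1).foldl pvStep 1

lemma pvModM (a : Int) : PySem.Int.mod a 100000 = a % 100000 :=
  PySem.Int.mod_eq_emod_of_pos (by norm_num)

lemma pvMod5 (a : Int) : PySem.Int.mod a 5 = a % 5 :=
  PySem.Int.mod_eq_emod_of_pos (by norm_num)

lemma pvStep_modeq (x i : Int) : pvStep x i ≡ x * pvStep 1 i [ZMOD 100000] := by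
  unfold pvStep
  simp only [pvMod5, pvModM]
  by_cases h : i % 5 ≠ 0
  · simp only [if_pos h, one_mul]
    calc x * i % 100000 ≡ x * i [ZMOD 100000] := Int.emod_emod_of_dvd _ dvd_rfl
      _ ≡ x * (i % 100000) [ZMOD 100000] :=
        Int.ModEq.mul_left x (Int.emod_emod_of_dvd _ dvd_rfl).symm
  · simp only [if_neg h, mul_one]
    exact Int.ModEq.refl x

lemma pvFoldl_shift (L : List Int) : ∀ x : Int,
    L.foldl pvStep x ≡ x * L.foldl pvStep 1 [ZMOD 100000] := by
  induction L with
  | nil => intro x; simp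
  | cons i L ih =>
    intro x
    simp only [List.foldl_cons]
    calc L.foldl pvStep (pvStep x i)
        ≡ pvStep x i * L.foldl pvStep 1 [ZMOD 100000] := ih _
      _ ≡ (x * pvStep 1 i) * L.foldl pvStep 1 [ZMOD 100000] :=
          Int.ModEq.mul_right _ (pvStep_modeq x i)
      _ = x * (pvStep 1 i * L.foldl pvStep 1) := by ring
      _ ≡ x * L.foldl pvStep (pvStep 1 i) [ZMOD 100000] :=
          Int.ModEq.mul_left x (ih (pvStep 1 i)).symm

lemma pvRange_succ (m : Nat) :
    PySem.List.pyRange 1 (((m + 1 : Nat) : Int) + 1)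
      = PySem.List.pyRange 1 ((m : Int) + 1) ++ [(m : Int) + 1] := by
  rw [show (((m + 1 : Nat) : Int) + 1) = ((m : Int) + 1) + 1 from by push_cast; ring]
  exact PySem.List.pyRange_one_succ_right (by omega)

lemma pvP_succ (m : Nat) : pvP (m + 1) = pvStep (pvP m) ((m : Int) + 1) := by
  unfold pvP
  rw [pvRange_succ m, List.foldl_append]
  rfl

lemma pvBuild_char : ∀ m : Nat,
    (PySem.List.pyRange 1 ((m : Int) + 1) 1).foldl
      (fun st i =>
        let cp := if PySem.Int.mod i 5 ≠ 0 then PySem.Int.mod (st.1 * i) 100000 else st.1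
        (cp, cp :: st.2))
      ((1 : Int), ([1] : List Int))
    = (pvP m, ((List.range (m + 1)).map pvP).reverse) := by
  intro m
  induction m with
  | zero =>
    have h0 : pvP 0 = 1 := by
      unfold pvP
      rw [show (((0 : Nat) : Int) + 1) = 1 from by norm_num,
        PySem.List.pyRange_one_eq_nil (le_refl (1 : Int))]
      rfl
    rw [show (((0 : Nat) : Int) + 1) = 1 from by norm_num,
      PySem.List.pyRange_one_eq_nil (le_refl (1 : Int))]
    simp [h0]
  | succ m ih =>
    rw [pvRange_succ m, List.foldl_append, ih]
    simp only [List.foldl_cons, List.foldl_nil]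
    show (pvStep (pvP m) ((m : Int) + 1),
        pvStep (pvP m) ((m : Int) + 1) :: ((List.range (m + 1)).map pvP).reverse)
      = (pvP (m + 1), ((List.range (m + 1 + 1)).map pvP).reverse)
    rw [← pvP_succ]
    rw [List.range_succ (n := m + 1), List.map_append, List.reverse_append]
    simp

lemma pvBuild_eq : pvBuild = (pvP 100000, ((List.range 100001).map pvP).reverse) := by
  have h := pvBuild_char 100000
  rw [show ((100000 : Nat) : Int) + 1 = 100001 from by norm_num,
    show (100000 : Nat) + 1 = 100001 from by norm_num] at h
  unfold pvBuild
  exact h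

lemma pvCycle_eq : pvCycle = pvP 100000 := by
  rw [pvCycle, pvBuild_eq]

lemma pvPref_eq : pvPref = (List.range 100001).map pvP := by
  rw [pvPref, pvBuild_eq]
  simp

lemma pvPref_get (r : Int) (h0 : 0 ≤ r) (h1 : r < 100000) :
    ((PySem.List.pyGet? pvPref r).getD 0) = pvP r.toNat := by
  rw [PySem.List.pyGet?_of_nonneg pvPref h0, pvPref_eq]
  have hr : r.toNat < 100001 := by omega
  simp [hr]

-- A's inline cycle-product fold is pvP 100000
lemma pvACycle_eq :
    List.foldl pvStep 1 (PySem.List.pyRange 1 100001) = pvP 100000 := by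
  unfold pvP
  rw [show ((100000 : Nat) : Int) + 1 = 100001 from by norm_num]

lemma pvSelf (a : Int) : a % 100000 ≡ a [ZMOD 100000] := Int.emod_emod_of_dvd a dvd_rfl

-- one level of the two loops, as a pure mod-arithmetic fact
lemma pvLevel (res pw Pr F S : Int) (hS : S ≡ pw * Pr [ZMOD 100000]) :
    res * pw % 100000 * Pr % 100000 * F % 100000 = res * (S * F % 100000) % 100000 := by
  have e3 : res * pw % 100000 * Pr % 100000 ≡ res * pw * Pr [ZMOD 100000] :=
    (pvSelf _).trans ((pvSelf _).mul_right Pr)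
  have l1 : res * pw % 100000 * Pr % 100000 * F ≡ res * pw * Pr * F [ZMOD 100000] :=
    e3.mul_right F
  have r2 : res * (S * F % 100000) ≡ res * (pw * Pr * F) [ZMOD 100000] :=
    ((pvSelf _).trans (hS.mul_right F)).mul_left res
  have r3 : res * pw * Pr * F ≡ res * (S * F % 100000) [ZMOD 100000] := by
    rw [show res * pw * Pr * F = res * (pw * Pr * F) from by ring]
    exact r2.symm
  exact l1.trans r3

-- main loop correspondence: B's iterative loop equals res · F(k) mod 100000 levelwise
lemma pvMain : ∀ (f : Nat) (k res : Int), 0 ≤ k → k.toNat < f → 0 ≤ res → res < 100000 →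
    pvBLoop f k res = res * pvAF f k % 100000 := by
  intro f
  induction f with
  | zero => intro k res hk hf _ _; exact absurd hf (Nat.not_lt_zero _)
  | succ f ih =>
    intro k res hk hf hres0 hres1
    by_cases hkpos : k > 0
    · have hne : ¬ (k = 0) := by omega
      have hq : PySem.Int.floordiv k 100000 = k / 100000 :=
        PySem.Int.floordiv_eq_ediv_of_pos (by norm_num)
      have hr : PySem.Int.mod k 100000 = k % 100000 :=
        PySem.Int.mod_eq_emod_of_pos (by norm_num)
      have hr0 : (0 : Int) ≤ k % 100000 := Int.emod_nonneg k (by norm_num)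
      have hr1 : k % 100000 < 100000 := Int.emod_lt_of_pos k (by norm_num)
      have hk5 : PySem.Int.floordiv k 5 = k / 5 :=
        PySem.Int.floordiv_eq_ediv_of_pos (by norm_num)
      have hfuel : (k / 5).toNat < f := by omega
      have hP : List.foldl pvStep 1 (PySem.List.pyRange 1 (k % 100000 + 1))
          = pvP (k % 100000).toNat := by
        unfold pvP
        rw [show ((k % 100000).toNat : Int) + 1 = k % 100000 + 1 from by omega]
      have hS : List.foldl pvStep (PySem.Int.powMod (pvP 100000) (k / 100000).toNat 100000)
            (PySem.List.pyRange 1 (k % 100000 + 1))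
          ≡ PySem.Int.powMod (pvP 100000) (k / 100000).toNat 100000
              * pvP (k % 100000).toNat [ZMOD 100000] := by
        have h := pvFoldl_shift (PySem.List.pyRange 1 (k % 100000 + 1))
          (PySem.Int.powMod (pvP 100000) (k / 100000).toNat 100000)
        rw [hP] at h
        exact h
      simp only [pvBLoop, pvAF]
      rw [if_pos hkpos, if_neg hne]
      simp only [pvStepLam]
      simp only [hq, hr, hk5, pvModM]
      rw [pvACycle_eq, pvCycle_eq]
      rw [pvPref_get _ hr0 hr1]
      rw [ih (k / 5)
        (res * PySem.Int.powMod (pvP 100000) (k / 100000).toNat 100000 % 100000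
          * pvP (k % 100000).toNat % 100000)
        (by omega) hfuel (Int.emod_nonneg _ (by norm_num)) (Int.emod_lt_of_pos _ (by norm_num))]
      exact pvLevel res (PySem.Int.powMod (pvP 100000) (k / 100000).toNat 100000)
        (pvP (k % 100000).toNat) (pvAF f (k / 5))
        (List.foldl pvStep (PySem.Int.powMod (pvP 100000) (k / 100000).toNat 100000)
          (PySem.List.pyRange 1 (k % 100000 + 1))) hS
    · have hk0 : k = 0 := by omega
      subst hk0
      have e1 : pvBLoop (f + 1) 0 res = res := by
        simp only [pvBLoop]
        rw [if_neg (show ¬ ((0 : Int) > 0) from by omega)]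
      have e2 : pvAF (f + 1) 0 = 1 := by
        simp only [pvAF]
        exact if_pos trivial
      rw [e1, e2, mul_one]
      exact (Int.emod_eq_of_lt hres0 hres1).symm

lemma pvZ_eq : ∀ (f : Nat) (t z : Int), pvBZLoop f t z = pvAZLoop f t z
  | 0, _, _ => rfl
  | f + 1, t, z => by
    simp only [pvBZLoop, pvAZLoop]
    split
    · exact pvZ_eq f _ _
    · rfl

-- ===== VERDICT (by name: the statement is the Claim_ definition above) =====
theorem last_five_digits_before_trailing_zeros_spec :
    Claim_equal_last_five_digits_before_trailing_zeros := by
  intro n _ hpre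
  unfold Spec_last_five_digits_before_trailing_zeros
  simp only [last_five_digits_before_trailing_zeros, last_five_digits_before_trailing_zeros_alt,
    pvZ_eq]
  rw [pvMain (n.toNat + 1) n 1 hpre (by omega) (by norm_num) (by norm_num), one_mul]
  simp only [pvModM]
  exact (Int.ModEq.mul_right _ (pvSelf _)).symm
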